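-- pv_equiv track=rewrite | github.com/rwxayheee/gemile | parse_bld.py | parse_mapping
-- ===== SOURCE A (Python) =====
-- def parse_mapping(input_block):
--     parsed_dict = {}
--     keys = []
--     is_val_row = False
--     for line in input_block:
--         line = line.strip()
--         if ":::" in line:
--             is_val_row = True
--         elif not is_val_row:
--             keys.append(line)
--         elif keys:
--             key = keys.pop(0)
--             parsed_dict[key] = line
--     return parsed_dict
-- ===== SOURCE B (Python) =====
-- def parse_mapping(input_block):
--     lines = [line.strip() for line in input_block]
--     flags = [":::" in line for line in lines]
--     if True not in flags:
--         return {}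
--     i = flags.index(True)
--     keys = lines[:i]
--     vals = [line for line in lines[i + 1:] if ":::" not in line]
--     return dict(zip(keys, vals))
-- ===== Notes on version B (the rewrite author's own statement) =====
-- stated objective: simpler
-- what changed: Replaces the FIFO state-machine loop with a partition-then-zip: strip all lines, split at the first ':::' line, filter later ':::' lines out of the values, and build the dict with dict(zip(keys, vals)).
import Mathlib
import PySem

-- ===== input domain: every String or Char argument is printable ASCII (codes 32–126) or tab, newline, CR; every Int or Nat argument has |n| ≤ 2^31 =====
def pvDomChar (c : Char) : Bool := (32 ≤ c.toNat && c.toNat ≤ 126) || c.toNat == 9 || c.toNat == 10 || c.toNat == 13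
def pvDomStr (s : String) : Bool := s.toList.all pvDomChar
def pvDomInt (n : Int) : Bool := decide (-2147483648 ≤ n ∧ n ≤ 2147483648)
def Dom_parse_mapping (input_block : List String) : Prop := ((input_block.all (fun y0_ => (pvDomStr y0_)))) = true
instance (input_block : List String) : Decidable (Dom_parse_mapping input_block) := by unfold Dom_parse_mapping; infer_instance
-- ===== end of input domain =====

-- B replaces A's FIFO state-machine loop by a partition-then-zip pass (same return value; simpler decomposition).



-- ===== PORT A =====
-- A: state-machine fold over (parsed_dict, keys, is_val_row), keys.pop(0) as head/tail
def pmStep (s : List (String × String) × List String × Bool) (line : String) :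
    List (String × String) × List String × Bool :=
  let line := PySem.Str.strip line
  if PySem.Str.isIn ":::" line then (s.1, s.2.1, true)
  else if s.2.2 = false then (s.1, s.2.1 ++ [line], s.2.2)
  else match s.2.1 with
    | [] => s
    | k :: rest => (PySem.Dict.insert ⟨s.1⟩ k line |>.items, rest, s.2.2)

def parse_mapping (input_block : List String) : List (String × String) :=
  (input_block.foldl pmStep ([], [], false)).1

-- ===== PORT B =====
def parse_mapping_alt (input_block : List String) : List (String × String) :=
  let lines := input_block.map PySem.Str.strip
  let flags := lines.map (fun l => PySem.Str.isIn ":::" l)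
  match flags.idxOf? true with
  | none => []
  | some i =>
    let keys := lines.take i
    let vals := (lines.drop (i + 1)).filter (fun l => !(PySem.Str.isIn ":::" l))
    ((keys.zip vals).foldl (fun d p => PySem.Dict.insert d p.1 p.2) PySem.Dict.empty).items

-- ===== PRECONDITION & SPEC =====
def Spec_parse_mapping (input_block : List String) (out : List (String × String)) : Prop := out = parse_mapping_alt input_block
instance (input_block : List String) (out : List (String × String)) : Decidable (Spec_parse_mapping input_block out) := by unfold Spec_parse_mapping; infer_instance

-- ===== CLAIM (what is proved, stated in full; the proofs are below) =====
def Claim_equal_parse_mapping : Prop := ∀ (input_block : List String), Dom_parse_mapping input_block → Spec_parse_mapping input_block (parse_mapping input_block)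

-- ===== LEMMAS AND PROOFS =====

theorem pmStep_sep {l : String} (h : PySem.Str.isIn ":::" (PySem.Str.strip l) = true)
    (s : List (String × String) × List String × Bool) : pmStep s l = (s.1, s.2.1, true) := by
  simp only [pmStep]
  rw [if_pos h]

theorem pmStep_key {l : String} (h : ¬ PySem.Str.isIn ":::" (PySem.Str.strip l) = true)
    (d : List (String × String)) (acc : List String) :
    pmStep (d, acc, false) l = (d, acc ++ [PySem.Str.strip l], false) := by
  simp only [pmStep]
  rw [if_neg h, if_pos trivial]

theorem pmStep_val_nil {l : String} (h : ¬ PySem.Str.isIn ":::" (PySem.Str.strip l) = true)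
    (d : List (String × String)) : pmStep (d, [], true) l = (d, [], true) := by
  simp only [pmStep]
  rw [if_neg h, if_neg (by simp)]

theorem pmStep_val_cons {l : String} (h : ¬ PySem.Str.isIn ":::" (PySem.Str.strip l) = true)
    (d : List (String × String)) (k : String) (kr : List String) :
    pmStep (d, k :: kr, true) l =
      ((PySem.Dict.insert ⟨d⟩ k (PySem.Str.strip l)).items, kr, true) := by
  simp only [pmStep]
  rw [if_neg h, if_neg (by simp)]

-- value phase: once is_val_row is true, A folds exactly zip(keys, filtered values) into the dict
theorem pm_val_phase (rest : List String) (d : List (String × String)) (ks : List String) :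
    (rest.foldl pmStep (d, ks, true)).1 =
    ((ks.zip ((rest.map PySem.Str.strip).filter (fun l => !(PySem.Str.isIn ":::" l)))).foldl
      (fun d p => PySem.Dict.insert d p.1 p.2) (⟨d⟩ : PySem.Dict String String)).items := by
  induction rest generalizing d ks with
  | nil => simp [List.zip_nil_right]
  | cons l rest ih =>
    by_cases h : PySem.Str.isIn ":::" (PySem.Str.strip l) = true
    · rw [List.foldl_cons, pmStep_sep h, ih]
      simp only [List.map_cons, List.filter_cons, h, Bool.not_true, Bool.false_eq_true, if_false]
    · have hf : PySem.Str.isIn ":::" (PySem.Str.strip l) = false := Bool.eq_false_iff.mpr h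
      cases ks with
      | nil =>
        rw [List.foldl_cons, pmStep_val_nil h, ih]
        simp
      | cons k kr =>
        rw [List.foldl_cons, pmStep_val_cons h, ih]
        simp only [List.map_cons, List.filter_cons, hf, Bool.not_false, if_true,
          List.zip_cons_cons, List.foldl_cons]

-- key phase: folding A's step from the initial phase computes B's partition-then-zip result
theorem pm_key_phase (lines : List String) (acc : List String) :
    (lines.foldl pmStep ([], acc, false)).1 =
    (match ((lines.map PySem.Str.strip).map (fun l => PySem.Str.isIn ":::" l)).idxOf? true with
     | none => ([] : List (String × String))
     | some i =>
       (((acc ++ (lines.map PySem.Str.strip).take i).zip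
          (((lines.map PySem.Str.strip).drop (i + 1)).filter (fun l => !(PySem.Str.isIn ":::" l)))).foldl
          (fun d p => PySem.Dict.insert d p.1 p.2) PySem.Dict.empty).items) := by
  induction lines generalizing acc with
  | nil => simp [List.idxOf?]
  | cons l ls ih =>
    by_cases h : PySem.Str.isIn ":::" (PySem.Str.strip l) = true
    · rw [List.foldl_cons, pmStep_sep h, pm_val_phase]
      simp only [List.map_cons, List.idxOf?, List.findIdx?_cons, h, beq_self_eq_true, if_true,
        List.take_zero, List.append_nil, List.drop_succ_cons, List.drop_zero]
      rfl
    · have hf : PySem.Str.isIn ":::" (PySem.Str.strip l) = false := Bool.eq_false_iff.mpr h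
      rw [List.foldl_cons, pmStep_key h, ih]
      simp only [List.map_cons, List.idxOf?, List.findIdx?_cons, hf]
      rw [if_neg (by decide)]
      cases hfi : ((ls.map PySem.Str.strip).map (fun l => PySem.Str.isIn ":::" l)).findIdx?
          (fun x => x == true) with
      | none => simp
      | some i =>
        simp only [Option.map_some]
        simp only [List.take_succ_cons, List.drop_succ_cons, List.append_assoc,
          List.singleton_append]

-- ===== VERDICT (by name: the statement is the Claim_ definition above) =====
theorem parse_mapping_spec : Claim_equal_parse_mapping := by
  intro input_block _
  unfold Spec_parse_mapping parse_mapping parse_mapping_alt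
  rw [pm_key_phase]
  rfl
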